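-- pv_equiv track=rewrite | github.com/DeadManOfficial/BlackBox | modules/scraper/scraper_enhancements.py | should_use_cloudscraper
-- ===== SOURCE A (Python) =====
-- def should_use_cloudscraper(response_text: str) -> bool:
--     """Detect if Cloudflare challenge is present"""
--     cloudflare_indicators = [
--         'Checking your browser',
--         'Just a moment',
--         'cf-browser-verification',
--         'cf_clearance',
--         '__cf_bm'
--     ]
--     return any(indicator in response_text for indicator in cloudflare_indicators)
-- ===== SOURCE B (Python) =====
-- def should_use_cloudscraper(response_text: str) -> bool:
--     """Detect if Cloudflare challenge is present"""
--     cloudflare_indicators = [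
--         'Checking your browser',
--         'Just a moment',
--         'cf-browser-verification',
--         'cf_clearance',
--         '__cf_bm'
--     ]
--     # single left-to-right pass over the text: at each position, test whether
--     # any indicator starts there (multi-pattern search in one sweep)
--     for i in range(len(response_text) + 1):
--         for p in cloudflare_indicators:
--             if response_text.startswith(p, i):
--                 return True
--     return False
-- ===== Notes on version B (the rewrite author's own statement) =====
-- stated objective: alternative
-- what changed: Replaced five independent full-text substring scans ('in' per indicator) with a single left-to-right pass that at each position tests whether any indicator starts there.
import Mathlib
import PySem

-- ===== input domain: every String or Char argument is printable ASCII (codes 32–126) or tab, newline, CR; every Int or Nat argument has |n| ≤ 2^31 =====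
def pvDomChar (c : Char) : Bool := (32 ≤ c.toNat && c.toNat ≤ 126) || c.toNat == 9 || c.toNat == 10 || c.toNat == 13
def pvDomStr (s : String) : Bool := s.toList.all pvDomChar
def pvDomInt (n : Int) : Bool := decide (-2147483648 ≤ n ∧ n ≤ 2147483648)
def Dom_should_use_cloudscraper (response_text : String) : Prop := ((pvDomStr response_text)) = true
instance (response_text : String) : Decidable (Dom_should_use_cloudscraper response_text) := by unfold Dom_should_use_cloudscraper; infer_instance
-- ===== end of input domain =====

-- B replaces A's five independent full-text substring scans with a single
-- left-to-right pass that tests every indicator at each position (alternative, same cost).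

-- ===== PORT A =====
-- A: any(indicator in response_text for indicator in cloudflare_indicators)
def should_use_cloudscraper (response_text : String) : Bool :=
  ["Checking your browser",
   "Just a moment",
   "cf-browser-verification",
   "cf_clearance",
   "__cf_bm"].any (fun indicator => PySem.Str.isIn indicator response_text)

-- ===== PORT B =====
-- B's single sweep: at each position (each suffix) test whether some pattern starts there.
def cfScan (inds : List (List Char)) : List Char → Bool
  | [] => inds.any (fun p => p.isPrefixOf ([] : List Char))
  | c :: rest => inds.any (fun p => p.isPrefixOf (c :: rest)) || cfScan inds rest

def should_use_cloudscraper_alt (response_text : String) : Bool :=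
  cfScan (["Checking your browser",
           "Just a moment",
           "cf-browser-verification",
           "cf_clearance",
           "__cf_bm"].map String.toList) response_text.toList

-- ===== PRECONDITION & SPEC =====
def Spec_should_use_cloudscraper (response_text : String) (out : Bool) : Prop := out = should_use_cloudscraper_alt response_text
instance (response_text : String) (out : Bool) : Decidable (Spec_should_use_cloudscraper response_text out) := by unfold Spec_should_use_cloudscraper; infer_instance

-- ===== CLAIM (what is proved, stated in full; the proofs are below) =====
def Claim_equal_should_use_cloudscraper : Prop := ∀ (response_text : String), Dom_should_use_cloudscraper response_text → Spec_should_use_cloudscraper response_text (should_use_cloudscraper response_text)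

-- ===== LEMMAS AND PROOFS =====

theorem cfScan_eq_true_iff (inds : List (List Char)) (cs : List Char) :
    cfScan inds cs = true ↔ ∃ p ∈ inds, p <:+: cs := by
  induction cs with
  | nil =>
      simp [cfScan, List.any_eq_true, List.isPrefixOf_iff_prefix]
  | cons c t ih =>
      simp only [cfScan, Bool.or_eq_true, List.any_eq_true,
        List.isPrefixOf_iff_prefix, ih, List.infix_cons_iff]
      constructor
      · rintro (⟨p, hp, h⟩ | ⟨p, hp, h⟩)
        · exact ⟨p, hp, Or.inl h⟩
        · exact ⟨p, hp, Or.inr h⟩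
      · rintro ⟨p, hp, h | h⟩
        · exact Or.inl ⟨p, hp, h⟩
        · exact Or.inr ⟨p, hp, h⟩

-- ===== VERDICT (by name: the statement is the Claim_ definition above) =====
theorem should_use_cloudscraper_spec : Claim_equal_should_use_cloudscraper := by
  intro s _
  unfold Spec_should_use_cloudscraper should_use_cloudscraper should_use_cloudscraper_alt
  refine Bool.eq_iff_iff.mpr ?_
  rw [cfScan_eq_true_iff]
  simp only [List.any_eq_true, List.mem_map, PySem.Str.isIn_iff_infix]
  constructor
  · rintro ⟨ind, hind, h⟩
    exact ⟨ind.toList, ⟨ind, hind, rfl⟩, h⟩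
  · rintro ⟨p, ⟨ind, hind, rfl⟩, h⟩
    exact ⟨ind, hind, h⟩
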